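-- pv_equiv track=rewrite | github.com/complxalgorithm/TweetKeywordMapper | TweetKeywordData.py | get_state_counts
-- ===== SOURCE A (Python) =====
-- def get_state_counts(places, states):
--     # initialize counts dictionary
--     counts = {}
--
--     # iterate over the keys in states dict
--     for key in states:
--         # initialize counter to 0
--         count = 0
--
--         # go through each value in places list
--         for p in places:
--             # if the place is equal to the current states dict value, add 1 to the counter
--             if p == states[key]:
--                 count += 1
--
--         # add current state key and its count as the next key/value combo in counts dict
--         counts[key] = count
--
--     # return counts dict to parent function
--     return counts
-- ===== SOURCE B (Python) =====
-- def get_state_counts(places, states):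
--     # one-pass frequency table over places, then a single lookup per state
--     freq = {}
--     for p in places:
--         freq[p] = freq.get(p, 0) + 1
--     return {key: freq.get(value, 0) for key, value in states.items()}
-- ===== Notes on version B (the rewrite author's own statement) =====
-- stated objective: faster
-- what changed: Replaces the nested loop (one scan of places per state) by a frequency dictionary built in one pass over places, then a single lookup per state.
import Mathlib
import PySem

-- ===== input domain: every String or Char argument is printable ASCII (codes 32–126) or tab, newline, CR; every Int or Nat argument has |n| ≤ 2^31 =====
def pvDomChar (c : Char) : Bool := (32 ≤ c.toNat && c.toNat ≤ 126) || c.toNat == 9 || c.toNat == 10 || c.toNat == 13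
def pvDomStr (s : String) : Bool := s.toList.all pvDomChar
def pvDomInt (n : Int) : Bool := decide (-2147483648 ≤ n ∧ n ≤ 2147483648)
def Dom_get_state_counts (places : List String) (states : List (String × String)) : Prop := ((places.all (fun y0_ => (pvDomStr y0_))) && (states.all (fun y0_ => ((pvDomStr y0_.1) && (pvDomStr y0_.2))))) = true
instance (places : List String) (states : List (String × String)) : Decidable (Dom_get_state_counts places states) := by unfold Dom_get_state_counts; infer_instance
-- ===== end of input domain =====

-- B replaces A's nested loop (one scan of places per state key) by a frequency dictionary
-- built in one pass over places followed by a single lookup per state (objective: faster).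

-- ===== PORT A =====
-- A: for each key of the states dict, scan all of places counting p == states[key].
def get_state_counts (places : List String) (states : List (String × String)) : List (String × Int) :=
  let d := PySem.Dict.ofList states
  (d.keys.foldl (fun counts key =>
      counts.insert key
        (places.foldl (fun count p => if p == d.getD key "" then count + 1 else count) 0))
    PySem.Dict.empty).items
-- (states[key] with key drawn from states' own keys always succeeds; getD's default is never used)

-- ===== PORT B =====
-- B: freq = one-pass counter over places; result = {key: freq.get(value, 0) for key, value in states.items()}
def get_state_counts_alt (places : List String) (states : List (String × String)) : List (String × Int) :=
  let freq := places.foldl (fun (d : PySem.Dict String Int) p => d.insert p (d.getD p 0 + 1)) PySem.Dict.empty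
  ((PySem.Dict.ofList states).items.foldl
      (fun (counts : PySem.Dict String Int) kv => counts.insert kv.1 (freq.getD kv.2 0))
    PySem.Dict.empty).items

-- ===== PRECONDITION & SPEC =====
def Spec_get_state_counts (places : List String) (states : List (String × String)) (out : List (String × Int)) : Prop := out = get_state_counts_alt places states
instance (places : List String) (states : List (String × String)) (out : List (String × Int)) : Decidable (Spec_get_state_counts places states out) := by unfold Spec_get_state_counts; infer_instance

-- ===== CLAIM (what is proved, stated in full; the proofs are below) =====
def Claim_equal_get_state_counts : Prop := ∀ (places : List String) (states : List (String × String)), Dom_get_state_counts places states → Spec_get_state_counts places states (get_state_counts places states)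

-- ===== LEMMAS AND PROOFS =====

-- ===== VERDICT (by name: the statement is the Claim_ definition above) =====
theorem get_state_counts_spec : Claim_equal_get_state_counts := by
  intro places states _
  unfold Spec_get_state_counts
  simp only [get_state_counts, get_state_counts_alt]
  rw [PySem.Dict.foldl_insert_getD_add_one_eq_counter]
  simp only [PySem.Dict.keys, List.foldl_map]
  congr 1
  apply PySem.List.foldl_congr_mem'
  intro kv hmem acc
  have hv : (PySem.Dict.ofList states).getD kv.1 "" = kv.2 :=
    PySem.Dict.getD_of_mem_items _ (by simpa using hmem) (PySem.Dict.nodup_keys_ofList states) ""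
  rw [hv, PySem.Dict.getD_counter,
    PySem.List.foldl_count_if (fun p => p == kv.2) places 0]
  simp [List.count]
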